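-- pv_equiv track=rewrite | github.com/MrBrantCode/unitest_baseline | mut_generate/mist_train_cf/cf_99555/solution.py | get_top_recommendations
-- ===== SOURCE A (Python) =====
-- def get_top_recommendations(user, user_interests, mutual_friends):
--     user_interests_set = set(user_interests[user])
--     recommendations = {}
--     for friend in mutual_friends[user]:
--         friend_interests_set = set(user_interests[friend])
--         common_interests = user_interests_set.intersection(friend_interests_set)
--         num_common_interests = len(common_interests)
--         if num_common_interests > 0:
--             recommendations[friend] = num_common_interests
--     sorted_recommendations = sorted(recommendations.items(), key=lambda x: x[1], reverse=True)
--     return [x[0] for x in sorted_recommendations][:5]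
-- ===== SOURCE B (Python) =====
-- def get_top_recommendations(user, user_interests, mutual_friends):
--     my = set(user_interests[user])
--     buckets = {}
--     seen = set()
--     for friend in mutual_friends[user]:
--         if friend in seen:
--             continue
--         seen.add(friend)
--         c = len(my & set(user_interests[friend]))
--         if c > 0:
--             buckets.setdefault(c, []).append(friend)
--     result = []
--     for c in range(1, len(my) + 1):
--         result = buckets.get(c, []) + result
--     return result[:5]
-- ===== Notes on version B (the rewrite author's own statement) =====
-- stated objective: alternative
-- what changed: B replaces A's recommendations dict plus stable reverse comparison sort with a bucket (counting) sort: friends are bucketed by shared-interest count (first occurrence only, via a seen set) and buckets are emitted from the highest possible count down to 1.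
import Mathlib
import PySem

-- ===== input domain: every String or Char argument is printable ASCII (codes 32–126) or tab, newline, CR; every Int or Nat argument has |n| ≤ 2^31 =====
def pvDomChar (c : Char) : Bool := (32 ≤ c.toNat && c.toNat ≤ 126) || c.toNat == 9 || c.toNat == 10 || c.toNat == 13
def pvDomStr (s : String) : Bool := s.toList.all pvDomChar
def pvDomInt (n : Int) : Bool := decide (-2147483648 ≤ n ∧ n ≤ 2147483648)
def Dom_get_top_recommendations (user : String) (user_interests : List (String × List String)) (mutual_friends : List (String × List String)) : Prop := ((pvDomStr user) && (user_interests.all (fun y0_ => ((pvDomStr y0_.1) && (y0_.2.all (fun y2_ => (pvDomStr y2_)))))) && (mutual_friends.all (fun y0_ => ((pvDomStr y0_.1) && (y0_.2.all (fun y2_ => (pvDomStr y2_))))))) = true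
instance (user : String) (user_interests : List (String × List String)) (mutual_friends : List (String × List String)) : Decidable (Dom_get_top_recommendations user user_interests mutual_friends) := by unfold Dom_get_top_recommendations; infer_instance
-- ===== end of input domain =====

-- B replaces A's dict-then-stable-reverse-sort with a bucket (counting) sort keyed by the shared-interest
-- count, emitting buckets from the highest possible count down (objective: alternative; same observable
-- return value, no argument is mutated by either version).

-- ===== PORT A =====
def get_top_recommendations (user : String) (user_interests : List (String × List String)) (mutual_friends : List (String × List String)) : List String :=
  match (PySem.Dict.mk user_interests).get? user with
  | none => []  -- KeyError: excluded by Pre_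
  | some uis =>
    let user_interests_set := PySem.Set.ofList uis
    match (PySem.Dict.mk mutual_friends).get? user with
    | none => []  -- KeyError: excluded by Pre_
    | some friends =>
      let recommendations := friends.foldl (fun (d : PySem.Dict String Int) friend =>
        let friend_interests_set := PySem.Set.ofList ((PySem.Dict.mk user_interests).getD friend [])  -- KeyError on a missing friend key is excluded by Pre_
        let common_interests := PySem.Set.inter user_interests_set friend_interests_set
        let num_common_interests := PySem.Set.len common_interests
        if 0 < num_common_interests then d.insert friend num_common_interests else d)
        PySem.Dict.empty
      let sorted_recommendations := PySem.List.sorted recommendations.items (fun x => x.2) true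
      PySem.List.slice (sorted_recommendations.map (fun x => x.1)) none (some 5)

-- ===== PORT B =====
def get_top_recommendations_alt (user : String) (user_interests : List (String × List String)) (mutual_friends : List (String × List String)) : List String :=
  match (PySem.Dict.mk user_interests).get? user with
  | none => []  -- KeyError: excluded by Pre_
  | some uis =>
    let my := PySem.Set.ofList uis
    match (PySem.Dict.mk mutual_friends).get? user with
    | none => []  -- KeyError: excluded by Pre_
    | some friends =>
      let st := friends.foldl (fun (st : PySem.Set String × PySem.Dict Int (List String)) friend =>
        if PySem.Set.contains st.1 friend then st
        else
          let seen := PySem.Set.add st.1 friend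
          let c := PySem.Set.len (PySem.Set.inter my (PySem.Set.ofList ((PySem.Dict.mk user_interests).getD friend [])))  -- KeyError on a missing friend key is excluded by Pre_
          if 0 < c then (seen, st.2.modify c [] (fun l => l ++ [friend])) else (seen, st.2))
        (PySem.Set.empty, PySem.Dict.empty)
      let result := (PySem.List.pyRange 1 (PySem.Set.len my + 1)).foldl
        (fun r c => st.2.getD c [] ++ r) []
      PySem.List.slice result none (some 5)

-- ===== PRECONDITION & SPEC =====
-- Pre_ excludes exactly the inputs on which the Python A raises KeyError: user missing from either dict,
-- or some listed mutual friend missing from user_interests.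
def Pre_get_top_recommendations (user : String) (user_interests : List (String × List String)) (mutual_friends : List (String × List String)) : Prop :=
  (PySem.Dict.mk user_interests).contains user = true ∧
  (PySem.Dict.mk mutual_friends).contains user = true ∧
  ∀ f ∈ (PySem.Dict.mk mutual_friends).getD user [], (PySem.Dict.mk user_interests).contains f = true
instance (user : String) (user_interests : List (String × List String)) (mutual_friends : List (String × List String)) : Decidable (Pre_get_top_recommendations user user_interests mutual_friends) := by unfold Pre_get_top_recommendations; infer_instance

def pvWitness_get_top_recommendations : String × (List (String × List String)) × (List (String × List String)) :=
  ("ann", [("ann", ["x", "y"]), ("bob", ["y", "z"]), ("cal", ["w"])], [("ann", ["bob", "cal", "bob"])])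

def Spec_get_top_recommendations (user : String) (user_interests : List (String × List String)) (mutual_friends : List (String × List String)) (out : List String) : Prop := out = get_top_recommendations_alt user user_interests mutual_friends
instance (user : String) (user_interests : List (String × List String)) (mutual_friends : List (String × List String)) (out : List String) : Decidable (Spec_get_top_recommendations user user_interests mutual_friends out) := by unfold Spec_get_top_recommendations; infer_instance

-- ===== CLAIM (what is proved, stated in full; the proofs are below) =====
def Claim_equal_get_top_recommendations : Prop := ∀ (user : String) (user_interests : List (String × List String)) (mutual_friends : List (String × List String)), Dom_get_top_recommendations user user_interests mutual_friends → Pre_get_top_recommendations user user_interests mutual_friends → Spec_get_top_recommendations user user_interests mutual_friends (get_top_recommendations user user_interests mutual_friends)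

-- ===== LEMMAS AND PROOFS =====

-- [M, M-1, …, 1] as integers
def descInts : Nat → List Int
  | 0 => []
  | n + 1 => ((n : Int) + 1) :: descInts n

theorem mem_descInts {M : Nat} {c : Int} (h : c ∈ descInts M) : 1 ≤ c ∧ c ≤ (M : Int) := by
  induction M with
  | zero => simp [descInts] at h
  | succ n ih =>
    simp only [descInts, List.mem_cons] at h
    rcases h with h | h
    · omega
    · have := ih h; omega

-- insertBy walks past a prefix it does not insert into
theorem insertBy_append_of_not_before {α : Type} (before : α → α → Bool) (x : α)
    (A B : List α) (h : ∀ y ∈ A, before x y = false) :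
    PySem.List.insertBy before x (A ++ B) = A ++ PySem.List.insertBy before x B := by
  induction A with
  | nil => simp
  | cons a t ih =>
    have ha : before x a = false := h a (by simp)
    show PySem.List.insertBy before x (a :: (t ++ B)) = _
    simp only [PySem.List.insertBy, ha]
    rw [List.cons_append, ih (fun y hy => h y (by simp [hy]))]
    simp

-- insertBy puts x in front when it goes before everything
theorem insertBy_front {α : Type} (before : α → α → Bool) (x : α)
    (B : List α) (h : ∀ y ∈ B, before x y = true) :
    PySem.List.insertBy before x B = x :: B := by
  cases B with
  | nil => rfl
  | cons b t => simp [PySem.List.insertBy, h b (by simp)]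

-- one insertion step of the stable reverse insertion sort, on a bucket-grouped list
theorem ins_step {α : Type} (key : α → Int) (M : Nat) (x : α)
    (hx : 0 < key x ∧ key x ≤ (M : Int)) (p : List α) :
    PySem.List.insertBy (fun a b => decide (key b < key a)) x
      ((descInts M).flatMap (fun c => p.filter (fun y => key y == c)))
      = (descInts M).flatMap (fun c => (p ++ [x]).filter (fun y => key y == c)) := by
  induction M with
  | zero => exact absurd hx (by push_cast; omega)
  | succ n ih =>
    have hxn : key x ≤ (n : Int) + 1 := by have := hx.2; push_cast at this ⊢; omega
    simp only [descInts, List.flatMap_cons]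
    by_cases hk : key x = (n : Int) + 1
    · rw [insertBy_append_of_not_before _ _ _ _ (by
        intro y hy
        have : key y = (n : Int) + 1 := by
          simp only [List.mem_filter, beq_iff_eq] at hy; exact hy.2
        simp [this, hk])]
      rw [insertBy_front _ _ _ (by
        intro y hy
        simp only [List.mem_flatMap, List.mem_filter, beq_iff_eq] at hy
        obtain ⟨c, hc, _, hyc⟩ := hy
        have := mem_descInts hc
        simp only [decide_eq_true_eq]
        omega)]
      have h1 : (p ++ [x]).filter (fun y => key y == ((n : Int) + 1))
          = p.filter (fun y => key y == ((n : Int) + 1)) ++ [x] := by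
        simp [List.filter_append, hk]
      have h2 : (descInts n).flatMap (fun c => (p ++ [x]).filter (fun y => key y == c))
          = (descInts n).flatMap (fun c => p.filter (fun y => key y == c)) := by
        refine List.flatMap_congr (fun c hc => ?_)
        have := mem_descInts hc
        have hne : (key x == c) = false := by simp; omega
        simp [List.filter_append, hne]
      rw [h1, h2]
      simp
    · have hxle : key x ≤ (n : Int) := by omega
      rw [insertBy_append_of_not_before _ _ _ _ (by
        intro y hy
        have : key y = (n : Int) + 1 := by
          simp only [List.mem_filter, beq_iff_eq] at hy; exact hy.2
        simp only [this, decide_eq_false_iff_not]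
        omega)]
      rw [ih ⟨hx.1, hxle⟩]
      have h1 : (p ++ [x]).filter (fun y => key y == ((n : Int) + 1))
          = p.filter (fun y => key y == ((n : Int) + 1)) := by
        have hne : (key x == ((n : Int) + 1)) = false := by simp; omega
        simp [List.filter_append, hne]
      rw [h1]

-- the stable reverse sort groups equal keys in input order, keys descending
theorem sorted_rev_group {α : Type} (key : α → Int) (M : Nat) (xs : List α)
    (h : ∀ x ∈ xs, 0 < key x ∧ key x ≤ (M : Int)) :
    PySem.List.sorted xs key true
      = (descInts M).flatMap (fun c => xs.filter (fun y => key y == c)) := by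
  rw [PySem.List.sorted_rev_eq_foldl_insertBy]
  have aux : ∀ (ys p : List α), (∀ x ∈ ys, 0 < key x ∧ key x ≤ (M : Int)) →
      ys.foldl (fun acc x => PySem.List.insertBy (fun a b => decide (key b < key a)) x acc)
        ((descInts M).flatMap (fun c => p.filter (fun y => key y == c)))
      = (descInts M).flatMap (fun c => (p ++ ys).filter (fun y => key y == c)) := by
    intro ys
    induction ys with
    | nil => intro p _; simp
    | cons x t ih =>
      intro p hb
      simp only [List.foldl_cons]
      rw [ins_step key M x (hb x (by simp)) p]
      rw [ih (p ++ [x]) (fun y hy => hb y (by simp [hy]))]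
      simp
  have h0 := aux xs [] h
  rw [List.flatMap_eq_nil_iff.mpr (by simp)] at h0
  simpa using h0

-- ofList commutes with filter
theorem ofList_filter {q : String → Bool} (l : List String) :
    PySem.Set.ofList (l.filter q) = (PySem.Set.ofList l).filter q := by
  induction l using List.reverseRecOn with
  | nil => rfl
  | append_singleton l x ih =>
    have hR : PySem.Set.ofList (l ++ [x]) = PySem.Set.add (PySem.Set.ofList l) x := by
      rw [PySem.Set.ofList_append]; rfl
    by_cases hq : q x = true
    · have hL : (l ++ [x]).filter q = l.filter q ++ [x] := by simp [List.filter_append, hq]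
      have hL2 : PySem.Set.ofList (l.filter q ++ [x]) = PySem.Set.add (PySem.Set.ofList (l.filter q)) x := by
        rw [PySem.Set.ofList_append]; rfl
      rw [hL, hL2, hR, ih]
      by_cases hxl : x ∈ l
      · simp [PySem.Set.add, PySem.Set.contains, hxl, hq]
      · simp [PySem.Set.add, PySem.Set.contains, hxl, hq, List.filter_append]
    · have hqf : q x = false := by simpa using hq
      have hL : (l ++ [x]).filter q = l.filter q := by simp [List.filter_append, hqf]
      rw [hL, hR, ih]
      by_cases hxl : x ∈ l
      · simp [PySem.Set.add, PySem.Set.contains, hxl]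
      · simp [PySem.Set.add, PySem.Set.contains, hxl, List.filter_append, hqf]

-- the items of A's recommendations dict: first occurrences of positive-count friends, each with its count
theorem recsA_items (cnt : String → Int) (p : List String) :
    (p.foldl (fun (d : PySem.Dict String Int) f =>
        if 0 < cnt f then d.insert f (cnt f) else d) PySem.Dict.empty).items
    = (PySem.Set.ofList (p.filter (fun f => decide (0 < cnt f)))).map (fun f => (f, cnt f)) := by
  induction p using List.reverseRecOn with
  | nil => rfl
  | append_singleton p f ih =>
    rw [List.foldl_append, List.foldl_cons, List.foldl_nil, List.filter_append]
    set d := p.foldl (fun (d : PySem.Dict String Int) f =>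
        if 0 < cnt f then d.insert f (cnt f) else d) PySem.Dict.empty with hd
    set S := PySem.Set.ofList (p.filter (fun f => decide (0 < cnt f))) with hS
    by_cases hc : 0 < cnt f
    · simp only [if_pos hc, List.filter_cons, decide_eq_true hc, List.filter_nil]
      rw [PySem.Set.ofList_append]
      show _ = (PySem.Set.add S f).map (fun f => (f, cnt f))
      by_cases hm : f ∈ S
      · have hcont : d.contains f = true := by
          simp only [PySem.Dict.contains, ih]
          simp only [List.any_map, List.any_eq_true, Function.comp]
          exact ⟨f, hm, by simp⟩
        rw [PySem.Dict.items_insert_of_contains _ _ hcont, ih]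
        have hadd : PySem.Set.add S f = S := by
          simp [PySem.Set.add, PySem.Set.contains, hm]
        rw [hadd, List.map_map]
        refine List.map_congr_left (fun g hg => ?_)
        by_cases hgf : g = f
        · simp [Function.comp, hgf]
        · simp [Function.comp, hgf]
      · have hcont : d.contains f = false := by
          simp only [PySem.Dict.contains, ih]
          simp only [List.any_map, Function.comp, List.any_eq_false]
          intro g hg
          have : g ≠ f := fun h => hm (h ▸ hg)
          simpa using this
        rw [PySem.Dict.items_insert_of_not_contains _ _ hcont, ih]
        have hadd : PySem.Set.add S f = S ++ [f] := by
          simp [PySem.Set.add, PySem.Set.contains, hm]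
        rw [hadd, List.map_append, List.map_cons, List.map_nil]
    · simp only [if_neg hc, List.filter_cons]
      have : decide (0 < cnt f) = false := by simpa using hc
      simp only [this, Bool.false_eq_true, if_false, List.filter_nil, List.append_nil]
      exact ih

-- B's loop state: seen is the set of processed friends, bucket c holds the first
-- occurrences of the friends whose count is exactly c
theorem stB_char (cnt : String → Int) (p : List String) :
    (p.foldl (fun (st : PySem.Set String × PySem.Dict Int (List String)) f =>
        if PySem.Set.contains st.1 f then st
        else
          if 0 < cnt f then (PySem.Set.add st.1 f, st.2.modify (cnt f) [] (fun l => l ++ [f]))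
          else (PySem.Set.add st.1 f, st.2))
      (PySem.Set.empty, PySem.Dict.empty)).1 = PySem.Set.ofList p ∧
    ∀ c : Int, 0 < c →
    (p.foldl (fun (st : PySem.Set String × PySem.Dict Int (List String)) f =>
        if PySem.Set.contains st.1 f then st
        else
          if 0 < cnt f then (PySem.Set.add st.1 f, st.2.modify (cnt f) [] (fun l => l ++ [f]))
          else (PySem.Set.add st.1 f, st.2))
      (PySem.Set.empty, PySem.Dict.empty)).2.getD c []
      = (PySem.Set.ofList p).filter (fun f => cnt f == c) := by
  induction p using List.reverseRecOn with
  | nil => exact ⟨rfl, fun c _ => rfl⟩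
  | append_singleton p f ih =>
    obtain ⟨ih1, ih2⟩ := ih
    rw [List.foldl_append, List.foldl_cons, List.foldl_nil]
    set st := p.foldl (fun (st : PySem.Set String × PySem.Dict Int (List String)) f =>
        if PySem.Set.contains st.1 f then st
        else
          if 0 < cnt f then (PySem.Set.add st.1 f, st.2.modify (cnt f) [] (fun l => l ++ [f]))
          else (PySem.Set.add st.1 f, st.2))
      (PySem.Set.empty, PySem.Dict.empty) with hst
    have hof : PySem.Set.ofList (p ++ [f]) = PySem.Set.add (PySem.Set.ofList p) f := by
      rw [PySem.Set.ofList_append]; rfl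
    by_cases hm : f ∈ PySem.Set.ofList p
    · have hfp : f ∈ p := (PySem.Set.mem_ofList p f).mp hm
      have hc1 : PySem.Set.contains st.1 f = true := by
        rw [ih1]; simp [PySem.Set.contains, hfp]
      have hadd : PySem.Set.add (PySem.Set.ofList p) f = PySem.Set.ofList p := by
        simp [PySem.Set.add, PySem.Set.contains, hfp]
      rw [if_pos hc1]
      exact ⟨by rw [ih1, hof, hadd], fun c hc => by rw [ih2 c hc, hof, hadd]⟩
    · have hfp : f ∉ p := fun h => hm ((PySem.Set.mem_ofList p f).mpr h)
      have hc1 : PySem.Set.contains st.1 f = false := by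
        rw [ih1]; simp [PySem.Set.contains, hfp]
      have hadd : PySem.Set.add (PySem.Set.ofList p) f = PySem.Set.ofList p ++ [f] := by
        simp [PySem.Set.add, PySem.Set.contains, hfp]
      rw [if_neg (ne_true_of_eq_false hc1)]
      by_cases hpos : 0 < cnt f
      · rw [if_pos hpos]
        refine ⟨by rw [ih1, hof], fun c hc => ?_⟩
        show (st.2.modify (cnt f) [] (fun l => l ++ [f])).getD c [] = _
        rw [PySem.Dict.getD_modify, hof, hadd, List.filter_append]
        by_cases hcf : c = cnt f
        · rw [if_pos hcf, hcf, ih2 (cnt f) (hcf ▸ hc)]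
          simp
        · rw [if_neg hcf, ih2 c hc]
          have : (cnt f == c) = false := by simpa using fun h => hcf h.symm
          simp [this]
      · rw [if_neg hpos]
        refine ⟨by rw [ih1, hof], fun c hc => ?_⟩
        show st.2.getD c [] = _
        rw [ih2 c hc, hof, hadd, List.filter_append]
        have : (cnt f == c) = false := by simp; omega
        simp [this]

-- emitting buckets for c = 1 … M while prepending builds the descending concatenation
theorem foldl_range_desc (g : Int → List String) (M : Nat) :
    (PySem.List.pyRange 1 ((M : Int) + 1)).foldl (fun r c => g c ++ r) []
      = (descInts M).flatMap g := by
  have aux : ∀ (M : Nat) (r0 : List String),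
      (PySem.List.pyRange 1 ((M : Int) + 1)).foldl (fun r c => g c ++ r) r0
        = (descInts M).flatMap g ++ r0 := by
    intro M
    induction M with
    | zero => intro r0; simp [PySem.List.pyRange, descInts]
    | succ n ih =>
      intro r0
      have hsplit : PySem.List.pyRange 1 ((n : Int) + 1 + 1)
          = PySem.List.pyRange 1 ((n : Int) + 1) ++ PySem.List.pyRange ((n : Int) + 1) ((n : Int) + 1 + 1) := by
        refine PySem.List.pyRange_one_append 1 ((n : Int) + 1) ((n : Int) + 1 + 1) (by omega) (by omega)
      have hlast : PySem.List.pyRange ((n : Int) + 1) ((n : Int) + 1 + 1) = [(n : Int) + 1] := by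
        rw [PySem.List.pyRange_one_cons (by omega)]
        simp [PySem.List.pyRange]
      push_cast
      rw [hsplit, hlast, List.foldl_append, ih r0, List.foldl_cons, List.foldl_nil]
      simp [descInts]
  simpa using aux M []
-- ===== VERDICT (by name: the statement is the Claim_ definition above) =====
theorem get_top_recommendations_spec : Claim_equal_get_top_recommendations := by
  intro user ui mf _ hpre
  obtain ⟨h1, h2, -⟩ := hpre
  unfold Spec_get_top_recommendations get_top_recommendations get_top_recommendations_alt
  rcases hui : (PySem.Dict.mk ui).get? user with _ | uis
  · rw [PySem.Dict.contains_eq_isSome_get?, hui] at h1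
  rcases hmf : (PySem.Dict.mk mf).get? user with _ | friends
  · rw [PySem.Dict.contains_eq_isSome_get?, hmf] at h2
  dsimp only
  have hcntle : ∀ f : String, (fun f => PySem.Set.len (PySem.Set.inter (PySem.Set.ofList uis) (PySem.Set.ofList ((PySem.Dict.mk ui).getD f [])))) f ≤ ((PySem.Set.ofList uis).length : Int) := by
    intro f
    simp only [PySem.Set.len, PySem.Set.inter]
    exact_mod_cast List.length_filter_le _ _
  have hA := recsA_items (fun f => PySem.Set.len (PySem.Set.inter (PySem.Set.ofList uis) (PySem.Set.ofList ((PySem.Dict.mk ui).getD f [])))) friends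
  have hb : ∀ x ∈ (friends.foldl (fun (d : PySem.Dict String Int) f =>
      if 0 < (fun f => PySem.Set.len (PySem.Set.inter (PySem.Set.ofList uis) (PySem.Set.ofList ((PySem.Dict.mk ui).getD f [])))) f then d.insert f ((fun f => PySem.Set.len (PySem.Set.inter (PySem.Set.ofList uis) (PySem.Set.ofList ((PySem.Dict.mk ui).getD f [])))) f) else d) PySem.Dict.empty).items,
      0 < (fun x : String × Int => x.2) x ∧ (fun x : String × Int => x.2) x ≤ (((PySem.Set.ofList uis).length : Nat) : Int) := by
    intro x hx
    rw [hA] at hx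
    simp only [List.mem_map] at hx
    obtain ⟨g, hg, rfl⟩ := hx
    have hgm : g ∈ List.filter (fun f => decide (0 < (fun f => PySem.Set.len (PySem.Set.inter (PySem.Set.ofList uis) (PySem.Set.ofList ((PySem.Dict.mk ui).getD f [])))) f)) friends := (PySem.Set.mem_ofList _ _).mp hg
    simp only [List.mem_filter, decide_eq_true_eq] at hgm
    exact ⟨hgm.2, hcntle g⟩
  have hsorted := sorted_rev_group (fun x : String × Int => x.2) ((PySem.Set.ofList uis).length) _ hb
  obtain ⟨hst1, hst2⟩ := stB_char (fun f => PySem.Set.len (PySem.Set.inter (PySem.Set.ofList uis) (PySem.Set.ofList ((PySem.Dict.mk ui).getD f [])))) friends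
  rw [PySem.List.slice_to _ (by norm_num), PySem.List.slice_to _ (by norm_num), hsorted,
    show (PySem.Set.ofList uis).len = ((PySem.Set.ofList uis).length : Int) from rfl,
    foldl_range_desc, List.map_flatMap]
  refine congrArg (List.take (5 : Int).toNat) ?_
  refine List.flatMap_congr (fun c hc => ?_)
  have hc0 := mem_descInts hc
  rw [hst2 c (by omega), hA, List.filter_map, List.map_map, ofList_filter, List.filter_filter]
  have hmapid : ∀ l : List String,
      List.map ((fun x : String × Int => x.1) ∘ (fun f => (f, (fun f => PySem.Set.len (PySem.Set.inter (PySem.Set.ofList uis) (PySem.Set.ofList ((PySem.Dict.mk ui).getD f [])))) f))) l = l := by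
    intro l
    have h : ∀ g ∈ l, ((fun x : String × Int => x.1) ∘
        (fun f => (f, PySem.Set.len (PySem.Set.inter (PySem.Set.ofList uis)
          (PySem.Set.ofList ((PySem.Dict.mk ui).getD f [])))))) g = id g := fun g _ => rfl
    rw [List.map_congr_left h, List.map_id]
  rw [hmapid]
  refine List.filter_congr (fun g hg => ?_)
  simp only [Function.comp_def]
  by_cases hgc : (fun f => PySem.Set.len (PySem.Set.inter (PySem.Set.ofList uis) (PySem.Set.ofList ((PySem.Dict.mk ui).getD f [])))) g = c
  · simp only [hgc]
    simp only [BEq.rfl, Bool.true_and]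
    have h0 : (0 : Int) < c := by omega
    simpa using h0
  · simp
    intro h
    exact absurd h hgc
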